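-- pv_equiv track=rewrite | github.com/takumakumakun/spectroradiometer_tools | csv2npy.py | split_tables
-- ===== SOURCE A (Python) =====
-- def split_tables(lines):
--     tables = []
--     current_table = []
--
--     for line in lines:
--         # Split lines with commas.
--         elements = line.strip().split(',')
--         # Check whether all elements are empty.
--         if all(e.strip() == '' for e in elements):
--             if current_table:  # Add if the current table is not empty.
--                 tables.append(current_table)
--                 current_table = []
--         else:
--             current_table.append(elements)
--
--     # Add last table if there is no blank line at the end of the file.
--     if current_table:
--         tables.append(current_table)
--
--     return tables
-- ===== SOURCE B (Python) =====
-- def split_tables(lines):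
--     rows = [line.strip().split(',') for line in lines]
--     blank = [all(e.strip() == '' for e in row) for row in rows]
--     tables = []
--     i, n = 0, len(rows)
--     while i < n:
--         if blank[i]:
--             i += 1
--         else:
--             j = i
--             while j < n and not blank[j]:
--                 j += 1
--             tables.append(rows[i:j])
--             i = j
--     return tables
-- ===== Notes on version B (the rewrite author's own statement) =====
-- stated objective: alternative
-- what changed: B precomputes the split rows and their blank flags, then scans with two index pointers, emitting each maximal non-blank run as a slice; no current_table accumulator and no final flush.
import Mathlib
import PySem

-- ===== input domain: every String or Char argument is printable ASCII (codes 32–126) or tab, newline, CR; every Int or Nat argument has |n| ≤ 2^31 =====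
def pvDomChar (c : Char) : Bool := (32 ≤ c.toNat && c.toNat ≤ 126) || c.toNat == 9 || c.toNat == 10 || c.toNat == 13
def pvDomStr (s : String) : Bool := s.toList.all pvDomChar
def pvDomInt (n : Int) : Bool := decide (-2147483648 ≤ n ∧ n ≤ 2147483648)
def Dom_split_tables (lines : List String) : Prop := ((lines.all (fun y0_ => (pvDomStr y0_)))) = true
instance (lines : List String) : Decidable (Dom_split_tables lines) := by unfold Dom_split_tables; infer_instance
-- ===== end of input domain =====

-- B replaces A's accumulator-and-flush loop by a two-pointer span scan over precomputed rows (alternative decomposition, same cost).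

-- ===== PORT A =====
-- line.strip().split(',')
-- exact: split(',') with a non-empty separator; Chars.splitOn is that form (split? s "," = some of it)
def pvRow (line : String) : List String :=
  (PySem.Chars.splitOn (PySem.Chars.strip line.toList) (",".toList)).map String.ofList
-- all(e.strip() == '' for e in elements)
def pvBlank (row : List String) : Bool := row.all (fun e => PySem.Str.strip e == "")

-- the for-loop of A, state (tables, current_table), plus the final flush
def pvALoop (lines : List String) (tables : List (List (List String))) (cur : List (List String)) :
    List (List (List String)) :=
  match lines with
  | [] => if cur ≠ [] then tables ++ [cur] else tables
  | l :: ls =>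
    let elements := pvRow l
    if pvBlank elements then
      if cur ≠ [] then pvALoop ls (tables ++ [cur]) [] else pvALoop ls tables cur
    else pvALoop ls tables (cur ++ [elements])

def split_tables (lines : List String) : List (List (List String)) :=
  pvALoop lines [] []

-- ===== PORT B =====
-- B's outer while-loop: skip a blank row, else take the maximal non-blank run (rows[i:j]) and continue at j
def pvSpanLoop (rows : List (List String)) : List (List (List String)) :=
  match rows with
  | [] => []
  | r :: rs =>
    if pvBlank r then pvSpanLoop rs
    else (r :: rs.takeWhile (fun x => !pvBlank x)) :: pvSpanLoop (rs.dropWhile (fun x => !pvBlank x))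
termination_by rows.length
decreasing_by
  · simp
  · simpa using Nat.lt_succ_of_le (List.length_dropWhile_le _ _)

def split_tables_alt (lines : List String) : List (List (List String)) :=
  pvSpanLoop (lines.map pvRow)

-- ===== PRECONDITION & SPEC =====
def Spec_split_tables (lines : List String) (out : List (List (List String))) : Prop := out = split_tables_alt lines
instance (lines : List String) (out : List (List (List String))) : Decidable (Spec_split_tables lines out) := by unfold Spec_split_tables; infer_instance

-- ===== CLAIM (what is proved, stated in full; the proofs are below) =====
def Claim_equal_split_tables : Prop := ∀ (lines : List String), Dom_split_tables lines → Spec_split_tables lines (split_tables lines)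

-- ===== LEMMAS AND PROOFS =====

-- A's loop only appends to `tables`: the prefix factors out.
theorem pvALoop_prefix (ls : List String) :
    ∀ (tables : List (List (List String))) (cur : List (List String)),
      pvALoop ls tables cur = tables ++ pvALoop ls [] cur := by
  induction ls with
  | nil =>
    intro tables cur
    simp only [pvALoop]
    split <;> simp
  | cons l ls ih =>
    intro tables cur
    simp only [pvALoop]
    split
    · split
      · simp only [List.nil_append]
        rw [ih (tables ++ [cur]) [], ih [cur] []]
        simp
      · exact ih tables cur
    · exact ih tables (cur ++ [pvRow l])

-- Combined invariant, by strong induction on the length of ls: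
-- (a) with a non-empty current table, A's loop emits cur extended by the leading non-blank run,
--     then behaves like B's span scan on the rest;
-- (b) with an empty current table, A's loop IS B's span scan on the mapped rows.
theorem pvCombined (n : Nat) : ∀ (ls : List String), ls.length ≤ n →
    ((∀ cur : List (List String), cur ≠ [] →
        pvALoop ls [] cur =
          (cur ++ (ls.map pvRow).takeWhile (fun x => !pvBlank x)) ::
            pvSpanLoop ((ls.map pvRow).dropWhile (fun x => !pvBlank x))) ∧
      pvALoop ls [] [] = pvSpanLoop (ls.map pvRow)) := by
  induction n with
  | zero =>
    intro ls hls
    have : ls = [] := List.eq_nil_of_length_eq_zero (Nat.le_zero.mp hls)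
    subst this
    constructor
    · intro cur hcur
      simp [pvALoop, pvSpanLoop, hcur]
    · simp [pvALoop, pvSpanLoop]
  | succ n ih =>
    intro ls hls
    match ls with
    | [] =>
      constructor
      · intro cur hcur; simp [pvALoop, pvSpanLoop, hcur]
      · simp [pvALoop, pvSpanLoop]
    | l :: ls =>
      have hlen : ls.length ≤ n := Nat.le_of_succ_le_succ hls
      constructor
      · intro cur hcur
        by_cases hb : pvBlank (pvRow l) = true
        · -- blank line: A flushes cur; B's run ends here
          simp only [pvALoop, hb, if_pos, hcur, ne_eq, not_false_eq_true,
            List.nil_append]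
          rw [pvALoop_prefix ls [cur] [], (ih ls hlen).2]
          simp [List.dropWhile, hb, pvSpanLoop]
        · -- non-blank: cur grows by the row
          simp only [pvALoop, hb, if_neg, Bool.not_eq_true, List.nil_append]
          rw [(ih ls hlen).1 (cur ++ [pvRow l]) (by simp)]
          simp [List.dropWhile, hb]
      · by_cases hb : pvBlank (pvRow l) = true
        · simp only [pvALoop, hb, if_pos, ne_eq, not_true_eq_false, if_neg,
            not_false_eq_true]
          rw [(ih ls hlen).2]
          simp [pvSpanLoop, hb]
        · simp only [pvALoop, hb, Bool.not_eq_true, if_neg, List.nil_append]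
          rw [(ih ls hlen).1 [pvRow l] (by simp)]
          simp [pvSpanLoop, hb, List.dropWhile]

-- ===== VERDICT (by name: the statement is the Claim_ definition above) =====
theorem split_tables_spec : Claim_equal_split_tables := by
  intro lines _
  unfold Spec_split_tables split_tables split_tables_alt
  exact (pvCombined lines.length lines (Nat.le_refl _)).2
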